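-- pv_equiv track=rewrite | github.com/gaineyllc/dgraphai | src/dgraphai/graph/backends/neo4j.py | _inject_tenant_scope
-- ===== SOURCE A (Python) =====
-- def _inject_tenant_scope(cypher: str) -> str:
--     """
--     Best-effort tenant scope injection.
--     Adds WHERE n.tenant_id = $__tid to simple MATCH statements.
--     Complex queries should include tenant scoping explicitly.
--     """
--     # Only inject for simple single-MATCH queries
--     lines = cypher.strip().split("\n")
--     result: list[str] = []
--     injected = False
--     for line in lines:
--         stripped = line.strip().upper()
--         if stripped.startswith("MATCH") and not injected:
--             result.append(line)
--             result.append("WHERE n.tenant_id = $__tid")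
--             injected = True
--         else:
--             result.append(line)
--     return "\n".join(result)
-- ===== SOURCE B (Python) =====
-- def _inject_tenant_scope(cypher: str) -> str:
--     """Locate-then-splice: find the first MATCH line, insert the WHERE clause after it."""
--     lines = cypher.strip().split("\n")
--     idx = next((i for i, l in enumerate(lines)
--                 if l.strip().upper().startswith("MATCH")), None)
--     if idx is not None:
--         lines.insert(idx + 1, "WHERE n.tenant_id = $__tid")
--     return "\n".join(lines)
-- ===== Notes on version B (the rewrite author's own statement) =====
-- stated objective: simpler
-- what changed: Replaces the append-everything-with-a-flag accumulator loop by locate-then-splice: find the index of the first MATCH line, then insert the WHERE clause once at idx+1.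
import Mathlib
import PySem

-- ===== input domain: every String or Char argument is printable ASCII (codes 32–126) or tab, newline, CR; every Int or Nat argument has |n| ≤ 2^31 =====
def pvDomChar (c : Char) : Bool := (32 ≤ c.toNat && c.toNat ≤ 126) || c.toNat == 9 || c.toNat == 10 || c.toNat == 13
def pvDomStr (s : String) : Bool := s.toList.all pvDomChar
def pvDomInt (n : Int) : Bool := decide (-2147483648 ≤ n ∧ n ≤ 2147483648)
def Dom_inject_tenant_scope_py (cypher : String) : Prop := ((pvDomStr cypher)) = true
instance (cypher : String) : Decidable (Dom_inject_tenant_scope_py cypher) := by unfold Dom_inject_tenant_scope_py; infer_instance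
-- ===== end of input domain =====

-- B is a simpler locate-then-splice decomposition of the same injection; return values proved equal.

-- ===== PORT A =====
def inject_tenant_scope_py (cypher : String) : String :=
  let lines := (PySem.Str.split? (PySem.Str.strip cypher) "\n").getD []  -- sep "\n" nonempty, split? is some
  let st := lines.foldl (fun (acc : List String × Bool) line =>
    let stripped := PySem.Str.upper (PySem.Str.strip line)
    if PySem.Str.startswith stripped "MATCH" && !acc.2 then
      (acc.1 ++ [line, "WHERE n.tenant_id = $__tid"], true)
    else
      (acc.1 ++ [line], acc.2)) ([], false)
  PySem.Str.join "\n" st.1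

-- ===== PORT B =====
def inject_tenant_scope_py_alt (cypher : String) : String :=
  let lines := (PySem.Str.split? (PySem.Str.strip cypher) "\n").getD []  -- sep "\n" nonempty, split? is some
  match lines.findIdx? (fun l => PySem.Str.startswith (PySem.Str.upper (PySem.Str.strip l)) "MATCH") with
  | none => PySem.Str.join "\n" lines
  | some i => PySem.Str.join "\n" (List.insertIdx lines (i + 1) "WHERE n.tenant_id = $__tid")

-- ===== PRECONDITION & SPEC =====
def Spec_inject_tenant_scope_py (cypher : String) (out : String) : Prop := out = inject_tenant_scope_py_alt cypher
instance (cypher : String) (out : String) : Decidable (Spec_inject_tenant_scope_py cypher out) := by unfold Spec_inject_tenant_scope_py; infer_instance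

-- ===== CLAIM (what is proved, stated in full; the proofs are below) =====
def Claim_equal_inject_tenant_scope_py : Prop := ∀ (cypher : String), Dom_inject_tenant_scope_py cypher → Spec_inject_tenant_scope_py cypher (inject_tenant_scope_py cypher)

-- ===== LEMMAS AND PROOFS =====

-- A's flag loop, once the flag is set, just appends the remaining lines.
theorem foldl_injected (w : String) (p : String → Bool) (lines acc : List String) :
    lines.foldl (fun (a : List String × Bool) line =>
      if p line && !a.2 then (a.1 ++ [line, w], true) else (a.1 ++ [line], a.2)) (acc, true)
    = (acc ++ lines, true) := by
  induction lines generalizing acc with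
  | nil => simp
  | cons l rest ih =>
    rw [List.foldl_cons, if_neg (by simp), ih]
    simp

-- A's flag loop with the flag unset equals locate-then-splice.
theorem foldl_key (w : String) (p : String → Bool) (lines acc : List String) :
    (lines.foldl (fun (a : List String × Bool) line =>
      if p line && !a.2 then (a.1 ++ [line, w], true) else (a.1 ++ [line], a.2)) (acc, false)).1
    = acc ++ (match lines.findIdx? p with
              | none => lines
              | some i => List.insertIdx lines (i + 1) w) := by
  induction lines generalizing acc with
  | nil => simp
  | cons l rest ih =>
    rw [List.foldl_cons]
    by_cases h : p l
    · rw [if_pos (by simp [h]), foldl_injected]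
      simp [List.findIdx?_cons, h, List.insertIdx]
    · rw [if_neg (by simp [h]), ih]
      rw [List.findIdx?_cons, if_neg (by simp [h])]
      cases hf : rest.findIdx? p with
      | none => simp
      | some i => simp [List.insertIdx]

-- ===== VERDICT (by name: the statement is the Claim_ definition above) =====
theorem inject_tenant_scope_py_spec : Claim_equal_inject_tenant_scope_py := by
  intro cypher _
  unfold Spec_inject_tenant_scope_py inject_tenant_scope_py inject_tenant_scope_py_alt
  simp only
  rw [foldl_key]
  cases ((PySem.Str.split? (PySem.Str.strip cypher) "\n").getD []).findIdx?
      (fun l => PySem.Str.startswith (PySem.Str.upper (PySem.Str.strip l)) "MATCH") <;> simp
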